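-- pv_equiv track=rewrite | github.com/501Good/PoetryMate | src/verse_pattern_tools.py | get_rhymes
-- ===== SOURCE A (Python) =====
-- def get_rhymes(verse_pattern):
--   rhymes = []
--   tmp_rhymes = []
--   for i, pattern in enumerate(verse_pattern[1:]):
--     tmp_rhymes.append(pattern[-1])
--     if pattern[-1] not in tmp_rhymes:
--       rhymes.append(i + 1)
--     else:
--       rhymes.append(tmp_rhymes.index(pattern[-1]) + 1)
--   return rhymes
-- ===== SOURCE B (Python) =====
-- def get_rhymes(verse_pattern):
--     # Inverted-index + scatter: bucket the positions of each last character,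
--     # then write each bucket's first position into every position of the bucket.
--     tails = [p[-1] for p in verse_pattern[1:]]
--     buckets = {}
--     for i, c in enumerate(tails):
--         buckets.setdefault(c, []).append(i)
--     out = [0] * len(tails)
--     for positions in buckets.values():
--         first = positions[0] + 1
--         for i in positions:
--             out[i] = first
--     return out
-- ===== Notes on version B (the rewrite author's own statement) =====
-- stated objective: alternative
-- what changed: replaces A's online scan (per line a membership test plus list.index over the growing prefix) by a staged inverted index: one pass extracts last characters, one pass buckets the positions of each character, then each bucket's first position is scattered into a preallocated output array
import Mathlib
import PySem

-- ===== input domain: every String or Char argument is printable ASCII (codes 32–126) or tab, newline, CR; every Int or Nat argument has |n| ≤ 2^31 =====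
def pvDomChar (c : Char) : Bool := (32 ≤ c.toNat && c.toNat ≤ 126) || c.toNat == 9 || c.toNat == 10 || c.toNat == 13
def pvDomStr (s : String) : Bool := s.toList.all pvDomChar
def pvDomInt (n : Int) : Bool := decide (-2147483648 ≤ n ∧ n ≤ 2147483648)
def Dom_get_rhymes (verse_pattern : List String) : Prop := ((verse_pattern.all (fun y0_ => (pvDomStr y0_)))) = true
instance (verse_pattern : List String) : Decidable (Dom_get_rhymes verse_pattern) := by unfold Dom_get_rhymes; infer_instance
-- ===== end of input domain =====

-- B replaces A's online scan (per line a membership test + list.index over the growing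
-- prefix) by a staged inverted index: extract the last characters, bucket the positions
-- of each character, then scatter each bucket's first position into a preallocated array.

-- pattern[-1]; the 'none' case (empty string, IndexError) is excluded by Pre_
def pvLastChar (p : String) : Char := (PySem.Str.pyGet? p (-1)).getD ' '

-- ===== PORT A =====
-- one loop step of A: append pattern[-1] to tmp_rhymes, then the membership branch
def getRhymesStepA (st : List Int × List Char) (ip : Int × String) : List Int × List Char :=
  let c := pvLastChar ip.2
  let tmp' := st.2 ++ [c]
  if ¬ tmp'.contains c then (st.1 ++ [ip.1 + 1], tmp')
  else (st.1 ++ [(((PySem.List.index? tmp' c).getD 0 : Nat) : Int) + 1], tmp')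

def get_rhymes (verse_pattern : List String) : List Int :=
  ((PySem.List.enumerate (PySem.List.slice verse_pattern (some 1) none) 0).foldl
    getRhymesStepA ([], [])).1

-- ===== PORT B =====
-- tails = [p[-1] for p in verse_pattern[1:]]
def getRhymesTails (verse_pattern : List String) : List Char :=
  (PySem.List.slice verse_pattern (some 1) none).map pvLastChar

-- for i, c in enumerate(tails): buckets.setdefault(c, []).append(i)
def getRhymesBuckets (cs : List Char) : PySem.Dict Char (List Int) :=
  (PySem.List.enumerate cs 0).foldl (fun d p => d.modify p.2 [] (· ++ [p.1])) PySem.Dict.empty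

-- for positions in buckets.values(): first = positions[0] + 1; for i in positions: out[i] = first
-- 'o.set j.toNat' is Python's out[j] = first: exact since every bucket position j has 0 ≤ j < len(out)
def getRhymesScatter (groups : List (List Int)) (out : List Int) : List Int :=
  groups.foldl (fun o g =>
    let first := (PySem.List.pyGet? g 0).getD 0 + 1
    g.foldl (fun o j => o.set j.toNat first) o) out

def get_rhymes_alt (verse_pattern : List String) : List Int :=
  let cs := getRhymesTails verse_pattern
  getRhymesScatter (getRhymesBuckets cs).values (List.replicate cs.length 0)

-- ===== PRECONDITION & SPEC =====
-- A (and B) raise IndexError on pattern[-1] when some line after the first is empty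
def Pre_get_rhymes (verse_pattern : List String) : Prop :=
  ∀ s ∈ verse_pattern.tail, s ≠ ""
instance (verse_pattern : List String) : Decidable (Pre_get_rhymes verse_pattern) := by
  unfold Pre_get_rhymes; infer_instance

def pvWitness_get_rhymes : List String := ["abba", "la", "dee", "da", "free"]

def Spec_get_rhymes (verse_pattern : List String) (out : List Int) : Prop := out = get_rhymes_alt verse_pattern
instance (verse_pattern : List String) (out : List Int) : Decidable (Spec_get_rhymes verse_pattern out) := by unfold Spec_get_rhymes; infer_instance

-- ===== CLAIM (what is proved, stated in full; the proofs are below) =====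
def Claim_equal_get_rhymes : Prop := ∀ (verse_pattern : List String), Dom_get_rhymes verse_pattern → Pre_get_rhymes verse_pattern → Spec_get_rhymes verse_pattern (get_rhymes verse_pattern)

-- ===== LEMMAS AND PROOFS =====

-- the common value: 1 + first position of c among the last characters cs
def rhymeVal (cs : List Char) (c : Char) : Int := (((PySem.List.index? cs c).getD 0 : Nat) : Int) + 1

-- the bucket of character c: all positions i (offset s) with cs[i] = c
def grpS (cs : List Char) (c : Char) (s : Int) : List Int :=
  ((PySem.List.enumerate cs s).filter (fun p => p.2 == c)).map (·.1)

-- ---- A's fold produces cs.map (rhymeVal cs) ----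
lemma aRes_eq (l : List String) (acc : List Int) (tmp : List Char) (s : Int) :
    ((PySem.List.enumerate l s).foldl getRhymesStepA (acc, tmp)).1
      = acc ++ (l.map pvLastChar).map (fun c =>
          (((PySem.List.index? (tmp ++ l.map pvLastChar) c).getD 0 : Nat) : Int) + 1) := by
  induction l generalizing acc tmp s with
  | nil => simp [PySem.List.enumerate_nil]
  | cons p l ih =>
    rw [PySem.List.enumerate_cons, List.foldl_cons]
    simp only [getRhymesStepA]
    rw [if_neg (by simp)]
    rw [ih]
    rw [← PySem.List.index?_append_of_mem (l.map pvLastChar)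
          (by simp : pvLastChar p ∈ tmp ++ [pvLastChar p])]
    simp

-- ---- buckets ----
lemma buckets_getD (cs : List Char) (c : Char) :
    (getRhymesBuckets cs).getD c [] = grpS cs c 0 := by
  unfold getRhymesBuckets grpS
  have hswap : (PySem.List.enumerate cs 0).foldl (fun d p => d.modify p.2 [] (· ++ [p.1])) PySem.Dict.empty
      = ((PySem.List.enumerate cs 0).map (fun p => (p.2, p.1))).foldl
          (fun d q => d.modify q.1 [] (· ++ [q.2])) PySem.Dict.empty := by
    rw [List.foldl_map]
  rw [hswap, PySem.Dict.getD_foldl_modify_append, PySem.Dict.getD_empty]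
  simp [List.filter_map, List.map_map, Function.comp_def]

lemma buckets_keys_nodup (cs : List Char) : (getRhymesBuckets cs).keys.Nodup := by
  unfold getRhymesBuckets
  exact PySem.Dict.nodup_keys_foldl_modify_key _ _ _ _ _ PySem.Dict.nodup_keys_empty

lemma buckets_mem_keys (cs : List Char) (c : Char) :
    c ∈ (getRhymesBuckets cs).keys ↔ c ∈ cs := by
  unfold getRhymesBuckets
  rw [PySem.Dict.keys_foldl_modify_key]
  simp [PySem.Set.mem_update, PySem.List.map_snd_enumerate]

lemma buckets_values (cs : List Char) :
    (getRhymesBuckets cs).values = (getRhymesBuckets cs).keys.map (fun c => grpS cs c 0) := by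
  rw [PySem.Dict.values_eq_map_keys _ (buckets_keys_nodup cs) []]
  exact List.map_congr_left (fun c _ => buckets_getD cs c)

-- ---- grpS facts ----
lemma mem_grpS (cs : List Char) (c : Char) (s i : Int) :
    i ∈ grpS cs c s ↔ ∃ (k : Nat) (hk : k < cs.length), i = s + k ∧ cs[k] = c := by
  unfold grpS
  simp only [List.mem_map, List.mem_filter, PySem.List.mem_enumerate_iff]
  constructor
  · rintro ⟨⟨a, b⟩, ⟨⟨k, hk, hab⟩, hbc⟩, hai⟩
    cases hab
    exact ⟨k, hk, hai.symm, by simpa using hbc⟩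
  · rintro ⟨k, hk, hi, hc⟩
    exact ⟨(s + k, cs[k]), ⟨⟨k, hk, rfl⟩, by simpa using hc⟩, hi.symm⟩

lemma grpS_head (cs : List Char) (c : Char) (s : Int) (h : c ∈ cs) :
    ∃ (k : Nat) (t : List Int),
      PySem.List.index? cs c = some k ∧ grpS cs c s = (s + (k : Int)) :: t := by
  induction cs generalizing s with
  | nil => cases h
  | cons c' cs ih =>
    by_cases hc : c' = c
    · subst hc
      refine ⟨0, ((PySem.List.enumerate cs (s+1)).filter (fun p => p.2 == c')).map (·.1),
        PySem.List.index?_cons_self c' cs, ?_⟩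
      unfold grpS
      rw [PySem.List.enumerate_cons]
      simp
    · have hmem : c ∈ cs := by
        rcases List.mem_cons.mp h with h' | h'
        · exact absurd h'.symm hc
        · exact h'
      obtain ⟨k, t, hk, ht⟩ := ih (s + 1) hmem
      refine ⟨k + 1, t, ?_, ?_⟩
      · rw [PySem.List.index?_cons_of_ne _ hc, hk]; rfl
      · unfold grpS
        rw [PySem.List.enumerate_cons]
        unfold grpS at ht
        have hne : (c' == c) = false := by simpa using hc
        simp only [List.filter_cons, hne, Bool.false_eq_true, if_false]
        rw [ht]
        congr 1
        push_cast
        ring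

-- ---- scatter ----
lemma setfold_length (g : List Int) (o : List Int) (w : Int) :
    (g.foldl (fun o j => o.set j.toNat w) o).length = o.length := by
  induction g generalizing o with
  | nil => rfl
  | cons j g ih => rw [List.foldl_cons, ih, List.length_set]

lemma setfold_getElem? (g : List Int) (o : List Int) (w : Int) (i : Nat)
    (hi : i < o.length) (hg : ∀ j ∈ g, 0 ≤ j) :
    (g.foldl (fun o j => o.set j.toNat w) o)[i]? = if (i : Int) ∈ g then some w else o[i]? := by
  induction g generalizing o with
  | nil => simp
  | cons j g ih =>
    have hj : 0 ≤ j := hg j List.mem_cons_self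
    rw [List.foldl_cons, ih (o.set j.toNat w) (by simpa using hi)
          (fun x hx => hg x (List.mem_cons_of_mem j hx))]
    by_cases hm : (i : Int) ∈ g
    · simp [hm]
    · by_cases hji : j = (i : Int)
      · have : j.toNat = i := by omega
        simp [hji.symm, this, hi]
      · have hne : j.toNat ≠ i := by omega
        simp [hm, List.getElem?_set_ne hne]
        intro h; exact absurd h.symm hji

lemma scatter_length (G : List (List Int)) (o : List Int) :
    (getRhymesScatter G o).length = o.length := by
  unfold getRhymesScatter
  induction G generalizing o with
  | nil => rfl
  | cons g G ih => rw [List.foldl_cons, ih, setfold_length]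

lemma scatter_getElem? (G : List (List Int)) (o : List Int) (i : Nat) (V : Int)
    (hi : i < o.length)
    (hnn : ∀ g ∈ G, ∀ j ∈ g, 0 ≤ j)
    (hv : ∀ g ∈ G, (i : Int) ∈ g → (PySem.List.pyGet? g 0).getD 0 + 1 = V) :
    (getRhymesScatter G o)[i]? = if ∃ g ∈ G, (i : Int) ∈ g then some V else o[i]? := by
  unfold getRhymesScatter
  induction G generalizing o with
  | nil => simp
  | cons g G ih =>
    rw [List.foldl_cons]
    rw [ih _ (by rw [setfold_length]; exact hi)
          (fun g' hg' => hnn g' (List.mem_cons_of_mem g hg'))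
          (fun g' hg' => hv g' (List.mem_cons_of_mem g hg'))]
    by_cases hG : ∃ g' ∈ G, (i : Int) ∈ g'
    · simp only [hG, if_true]
      rw [if_pos]
      obtain ⟨g', hg', hig'⟩ := hG
      exact ⟨g', List.mem_cons_of_mem g hg', hig'⟩
    · simp only [hG, if_false]
      rw [setfold_getElem? _ _ _ _ hi (hnn g List.mem_cons_self)]
      by_cases hmg : (i : Int) ∈ g
      · rw [if_pos hmg, if_pos ⟨g, List.mem_cons_self, hmg⟩, hv g List.mem_cons_self hmg]
      · rw [if_neg hmg, if_neg]
        rintro ⟨g', hg', hig'⟩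
        rcases List.mem_cons.mp hg' with rfl | h'
        · exact hmg hig'
        · exact hG ⟨g', h', hig'⟩

-- ---- the two sides ----
lemma a_eq_spec (vp : List String) :
    get_rhymes vp = (getRhymesTails vp).map (rhymeVal (getRhymesTails vp)) := by
  unfold get_rhymes getRhymesTails rhymeVal
  rw [aRes_eq]
  simp

lemma b_eq_spec (vp : List String) :
    get_rhymes_alt vp = (getRhymesTails vp).map (rhymeVal (getRhymesTails vp)) := by
  unfold get_rhymes_alt
  set cs := getRhymesTails vp with hcs
  apply List.ext_getElem?
  intro i
  by_cases hi : i < cs.length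
  · rw [scatter_getElem? _ _ i (rhymeVal cs cs[i]) (by simpa using hi) ?hnn ?hv]
    case hnn =>
      intro g hgmem j hj
      rw [buckets_values] at hgmem
      obtain ⟨c, _, rfl⟩ := List.mem_map.mp hgmem
      rcases (mem_grpS cs c 0 j).mp hj with ⟨k, hk, hjk, _⟩
      omega
    case hv =>
      intro g hgmem himem
      rw [buckets_values] at hgmem
      obtain ⟨c, hck, rfl⟩ := List.mem_map.mp hgmem
      rcases (mem_grpS cs c 0 i).mp himem with ⟨k, hk, hik, hck2⟩
      have hki : k = i := by omega
      subst hki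
      have hcmem : c ∈ cs := (buckets_mem_keys cs c).mp hck
      obtain ⟨k0, t, hk0, ht⟩ := grpS_head cs c 0 hcmem
      rw [ht]
      unfold rhymeVal
      rw [hck2, hk0]
      simp [PySem.List.pyGet?, PySem.List.pyIdx?]
    · have hex : ∃ g ∈ (getRhymesBuckets cs).values, (i : Int) ∈ g := by
        refine ⟨grpS cs cs[i] 0, ?_, ?_⟩
        · rw [buckets_values]
          exact List.mem_map.mpr ⟨cs[i], (buckets_mem_keys cs _).mpr (cs.getElem_mem hi), rfl⟩
        · exact (mem_grpS cs cs[i] 0 i).mpr ⟨i, hi, by simp, rfl⟩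
      rw [if_pos hex]
      simp [hi]
  · have h1 : i ≥ (getRhymesScatter (getRhymesBuckets cs).values
        (List.replicate cs.length 0)).length := by
      rw [scatter_length, List.length_replicate]; omega
    rw [List.getElem?_eq_none h1, List.getElem?_eq_none (by simpa using hi)]

-- ===== VERDICT (by name: the statement is the Claim_ definition above) =====
theorem get_rhymes_spec : Claim_equal_get_rhymes := by
  intro vp _ _
  unfold Spec_get_rhymes
  rw [a_eq_spec, b_eq_spec]
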